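-- pv_equiv track=rewrite | github.com/netra-systems/zen | scripts/validate_migration_readiness.py | categorize_files_by_priority
-- ===== SOURCE A (Python) =====
-- from typing import List, Dict, Tuple
--
-- def categorize_files_by_priority(files_with_patterns: List[Tuple[str, int]]) -> Dict[str, List[Tuple[str, int]]]:
--     """Categorize files by migration priority."""
--
--     categories = {
--         "Golden Path": [],
--         "Mission Critical": [],
--         "WebSocket Events": [],
--         "Integration Tests": [],
--         "Unit Tests": [],
--         "Other": []
--     }
--
--     for file_path, pattern_count in files_with_patterns:
--         if "golden_path" in file_path:
--             categories["Golden Path"].append((file_path, pattern_count))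
--         elif "mission_critical" in file_path:
--             categories["Mission Critical"].append((file_path, pattern_count))
--         elif "websocket" in file_path and ("test_websocket_agent_events" in file_path or "test_websocket_event" in file_path):
--             categories["WebSocket Events"].append((file_path, pattern_count))
--         elif "integration" in file_path:
--             categories["Integration Tests"].append((file_path, pattern_count))
--         elif "unit" in file_path:
--             categories["Unit Tests"].append((file_path, pattern_count))
--         else:
--             categories["Other"].append((file_path, pattern_count))
--
--     return categories
-- ===== SOURCE B (Python) =====
-- # B: idiomatic rewrite — an ordered rule table + a classify helper, with the
-- # result built as a dict comprehension of per-category filters (one bucket per rule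
-- # plus "Other"), instead of A's in-loop if/elif ladder appending into a mutable dict.
-- RULES = [
--     ("Golden Path", lambda p: "golden_path" in p),
--     ("Mission Critical", lambda p: "mission_critical" in p),
--     ("WebSocket Events", lambda p: "websocket" in p and ("test_websocket_agent_events" in p or "test_websocket_event" in p)),
--     ("Integration Tests", lambda p: "integration" in p),
--     ("Unit Tests", lambda p: "unit" in p),
-- ]
--
--
-- def _classify(path):
--     for name, pred in RULES:
--         if pred(path):
--             return name
--     return "Other"
--
--
-- def categorize_files_by_priority(files_with_patterns):
--     names = [name for name, _ in RULES] + ["Other"]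
--     return {name: [fp for fp in files_with_patterns if _classify(fp[0]) == name]
--             for name in names}
-- ===== Notes on version B (the rewrite author's own statement) =====
-- stated objective: idiomatic
-- what changed: Replaces the single pass with an in-loop if/elif ladder mutating a dict by an ordered rule table (predicate, name): a classify helper finds the first matching rule, and the result is a dict comprehension that builds each of the six buckets as a filter of the input.
import Mathlib
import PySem

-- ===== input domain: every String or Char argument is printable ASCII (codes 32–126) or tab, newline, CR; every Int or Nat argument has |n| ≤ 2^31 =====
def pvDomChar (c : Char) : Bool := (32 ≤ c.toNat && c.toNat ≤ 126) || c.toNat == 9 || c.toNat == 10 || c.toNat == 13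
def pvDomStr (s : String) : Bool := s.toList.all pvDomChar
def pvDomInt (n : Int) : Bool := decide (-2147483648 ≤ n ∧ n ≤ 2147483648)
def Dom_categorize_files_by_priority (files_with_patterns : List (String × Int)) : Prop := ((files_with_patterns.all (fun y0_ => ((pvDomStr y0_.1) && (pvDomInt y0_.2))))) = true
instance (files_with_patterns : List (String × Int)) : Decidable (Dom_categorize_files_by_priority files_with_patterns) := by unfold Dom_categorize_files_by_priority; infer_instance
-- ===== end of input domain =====

-- B replaces A's in-loop if/elif ladder over a mutable dict by an ordered rule table
-- with a classify helper and per-category filters (idiomatic rewrite, same cost).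


-- ===== PORT A =====
-- A's if/elif ladder, deciding which bucket the file goes to (branches in source order)
def pvKeyA (file_path : String) : String :=
  if PySem.Str.isIn "golden_path" file_path then "Golden Path"
  else if PySem.Str.isIn "mission_critical" file_path then "Mission Critical"
  else if PySem.Str.isIn "websocket" file_path &&
          (PySem.Str.isIn "test_websocket_agent_events" file_path ||
           PySem.Str.isIn "test_websocket_event" file_path) then "WebSocket Events"
  else if PySem.Str.isIn "integration" file_path then "Integration Tests"
  else if PySem.Str.isIn "unit" file_path then "Unit Tests"
  else "Other"

-- the loop body: append (file_path, pattern_count) to the bucket the ladder selects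
def pvStepA (d : PySem.Dict String (List (String × Int))) (fp : String × Int) :
    PySem.Dict String (List (String × Int)) :=
  d.modify (pvKeyA fp.1) [] (fun l => l ++ [(fp.1, fp.2)])

def categorize_files_by_priority (files_with_patterns : List (String × Int)) : List (String × List (String × Int)) :=
  let categories : PySem.Dict String (List (String × Int)) :=
    PySem.Dict.ofList [("Golden Path", []), ("Mission Critical", []), ("WebSocket Events", []),
                       ("Integration Tests", []), ("Unit Tests", []), ("Other", [])]
  (files_with_patterns.foldl pvStepA categories).items

-- ===== PORT B =====
def pvRulesB : List (String × (String → Bool)) :=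
  [("Golden Path", fun p => PySem.Str.isIn "golden_path" p),
   ("Mission Critical", fun p => PySem.Str.isIn "mission_critical" p),
   ("WebSocket Events", fun p => PySem.Str.isIn "websocket" p &&
       (PySem.Str.isIn "test_websocket_agent_events" p || PySem.Str.isIn "test_websocket_event" p)),
   ("Integration Tests", fun p => PySem.Str.isIn "integration" p),
   ("Unit Tests", fun p => PySem.Str.isIn "unit" p)]

def pvClassifyB : List (String × (String → Bool)) → String → String
  | [], _ => "Other"
  | (name, pred) :: rest, p => if pred p then name else pvClassifyB rest p

def categorize_files_by_priority_alt (files_with_patterns : List (String × Int)) : List (String × List (String × Int)) :=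
  let names := pvRulesB.map (·.1) ++ ["Other"]
  names.map (fun n => (n, files_with_patterns.filter (fun fp => pvClassifyB pvRulesB fp.1 == n)))

-- ===== PRECONDITION & SPEC =====
def Spec_categorize_files_by_priority (files_with_patterns : List (String × Int)) (out : List (String × List (String × Int))) : Prop := out = categorize_files_by_priority_alt files_with_patterns
instance (files_with_patterns : List (String × Int)) (out : List (String × List (String × Int))) : Decidable (Spec_categorize_files_by_priority files_with_patterns out) := by unfold Spec_categorize_files_by_priority; infer_instance

-- ===== CLAIM (what is proved, stated in full; the proofs are below) =====
def Claim_equal_categorize_files_by_priority : Prop := ∀ (files_with_patterns : List (String × Int)), Dom_categorize_files_by_priority files_with_patterns → Spec_categorize_files_by_priority files_with_patterns (categorize_files_by_priority files_with_patterns)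

-- ===== LEMMAS AND PROOFS =====

-- B's first-matching-rule classifier computes exactly A's ladder key
lemma classifyB_eq_keyA (p : String) : pvClassifyB pvRulesB p = pvKeyA p := by
  simp only [pvRulesB, pvClassifyB, pvKeyA]

-- the ladder key is always one of the six bucket names
lemma keyA_cases (p : String) :
    pvKeyA p = "Golden Path" ∨ pvKeyA p = "Mission Critical" ∨ pvKeyA p = "WebSocket Events" ∨
    pvKeyA p = "Integration Tests" ∨ pvKeyA p = "Unit Tests" ∨ pvKeyA p = "Other" := by
  unfold pvKeyA; split_ifs <;> simp

-- loop invariant: folding A's modify step over l, starting from the six fixed keys with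
-- arbitrary accumulated buckets, appends to each bucket exactly the files the ladder sends there
lemma foldA_invariant (l : List (String × Int)) (v1 v2 v3 v4 v5 v6 : List (String × Int)) :
    l.foldl pvStepA
      (PySem.Dict.mk [("Golden Path", v1), ("Mission Critical", v2), ("WebSocket Events", v3),
                      ("Integration Tests", v4), ("Unit Tests", v5), ("Other", v6)]) =
    PySem.Dict.mk
      [("Golden Path", v1 ++ l.filter (fun fp => pvKeyA fp.1 == "Golden Path")),
       ("Mission Critical", v2 ++ l.filter (fun fp => pvKeyA fp.1 == "Mission Critical")),
       ("WebSocket Events", v3 ++ l.filter (fun fp => pvKeyA fp.1 == "WebSocket Events")),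
       ("Integration Tests", v4 ++ l.filter (fun fp => pvKeyA fp.1 == "Integration Tests")),
       ("Unit Tests", v5 ++ l.filter (fun fp => pvKeyA fp.1 == "Unit Tests")),
       ("Other", v6 ++ l.filter (fun fp => pvKeyA fp.1 == "Other"))] := by
  induction l generalizing v1 v2 v3 v4 v5 v6 with
  | nil => simp
  | cons fp rest ih =>
    obtain ⟨p, c⟩ := fp
    rcases keyA_cases p with h | h | h | h | h | h
    · rw [List.foldl_cons,
          show pvStepA ⟨[("Golden Path", v1), ("Mission Critical", v2), ("WebSocket Events", v3), ("Integration Tests", v4), ("Unit Tests", v5), ("Other", v6)]⟩ (p, c) =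
            (⟨[("Golden Path", v1 ++ [(p, c)]), ("Mission Critical", v2), ("WebSocket Events", v3), ("Integration Tests", v4), ("Unit Tests", v5), ("Other", v6)]⟩ : PySem.Dict String (List (String × Int))) from by
              simp [pvStepA, PySem.Dict.modify, PySem.Dict.insert, PySem.Dict.getD,
                    PySem.Dict.get?, PySem.Dict.contains, h],
          ih]
      simp [h]
    · rw [List.foldl_cons,
          show pvStepA ⟨[("Golden Path", v1), ("Mission Critical", v2), ("WebSocket Events", v3), ("Integration Tests", v4), ("Unit Tests", v5), ("Other", v6)]⟩ (p, c) =
            (⟨[("Golden Path", v1), ("Mission Critical", v2 ++ [(p, c)]), ("WebSocket Events", v3), ("Integration Tests", v4), ("Unit Tests", v5), ("Other", v6)]⟩ : PySem.Dict String (List (String × Int))) from by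
              simp [pvStepA, PySem.Dict.modify, PySem.Dict.insert, PySem.Dict.getD,
                    PySem.Dict.get?, PySem.Dict.contains, h],
          ih]
      simp [h]
    · rw [List.foldl_cons,
          show pvStepA ⟨[("Golden Path", v1), ("Mission Critical", v2), ("WebSocket Events", v3), ("Integration Tests", v4), ("Unit Tests", v5), ("Other", v6)]⟩ (p, c) =
            (⟨[("Golden Path", v1), ("Mission Critical", v2), ("WebSocket Events", v3 ++ [(p, c)]), ("Integration Tests", v4), ("Unit Tests", v5), ("Other", v6)]⟩ : PySem.Dict String (List (String × Int))) from by
              simp [pvStepA, PySem.Dict.modify, PySem.Dict.insert, PySem.Dict.getD,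
                    PySem.Dict.get?, PySem.Dict.contains, h],
          ih]
      simp [h]
    · rw [List.foldl_cons,
          show pvStepA ⟨[("Golden Path", v1), ("Mission Critical", v2), ("WebSocket Events", v3), ("Integration Tests", v4), ("Unit Tests", v5), ("Other", v6)]⟩ (p, c) =
            (⟨[("Golden Path", v1), ("Mission Critical", v2), ("WebSocket Events", v3), ("Integration Tests", v4 ++ [(p, c)]), ("Unit Tests", v5), ("Other", v6)]⟩ : PySem.Dict String (List (String × Int))) from by
              simp [pvStepA, PySem.Dict.modify, PySem.Dict.insert, PySem.Dict.getD,
                    PySem.Dict.get?, PySem.Dict.contains, h],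
          ih]
      simp [h]
    · rw [List.foldl_cons,
          show pvStepA ⟨[("Golden Path", v1), ("Mission Critical", v2), ("WebSocket Events", v3), ("Integration Tests", v4), ("Unit Tests", v5), ("Other", v6)]⟩ (p, c) =
            (⟨[("Golden Path", v1), ("Mission Critical", v2), ("WebSocket Events", v3), ("Integration Tests", v4), ("Unit Tests", v5 ++ [(p, c)]), ("Other", v6)]⟩ : PySem.Dict String (List (String × Int))) from by
              simp [pvStepA, PySem.Dict.modify, PySem.Dict.insert, PySem.Dict.getD,
                    PySem.Dict.get?, PySem.Dict.contains, h],
          ih]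
      simp [h]
    · rw [List.foldl_cons,
          show pvStepA ⟨[("Golden Path", v1), ("Mission Critical", v2), ("WebSocket Events", v3), ("Integration Tests", v4), ("Unit Tests", v5), ("Other", v6)]⟩ (p, c) =
            (⟨[("Golden Path", v1), ("Mission Critical", v2), ("WebSocket Events", v3), ("Integration Tests", v4), ("Unit Tests", v5), ("Other", v6 ++ [(p, c)])]⟩ : PySem.Dict String (List (String × Int))) from by
              simp [pvStepA, PySem.Dict.modify, PySem.Dict.insert, PySem.Dict.getD,
                    PySem.Dict.get?, PySem.Dict.contains, h],
          ih]
      simp [h]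

-- ===== VERDICT (by name: the statement is the Claim_ definition above) =====
theorem categorize_files_by_priority_spec : Claim_equal_categorize_files_by_priority := by
  intro l _
  show categorize_files_by_priority l = categorize_files_by_priority_alt l
  unfold categorize_files_by_priority categorize_files_by_priority_alt
  simp only [classifyB_eq_keyA]
  rw [show PySem.Dict.ofList [("Golden Path", ([] : List (String × Int))), ("Mission Critical", []), ("WebSocket Events", []),
        ("Integration Tests", []), ("Unit Tests", []), ("Other", [])] =
      PySem.Dict.mk [("Golden Path", []), ("Mission Critical", []), ("WebSocket Events", []),
        ("Integration Tests", []), ("Unit Tests", []), ("Other", [])] from rfl]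
  rw [foldA_invariant]
  simp [pvRulesB]
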